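-- pv_equiv track=rewrite | github.com/baggychani/GichanFormantcode | ui/layer_logic.py | compute_order_after_drop
-- ===== SOURCE A (Python) =====
-- from typing import Any, Dict, List, Optional, Sequence
--
-- def compute_order_after_drop(
--     ordered_list: List[Any],
--     dragged_list: List[Any],
--     drop_target: Any,
--     after: bool,
-- ) -> Optional[List[Any]]:
--     """
--     드래그한 항목들을 drop_target 위(after=False) 또는 아래(after=True)에 삽입한 새 순서 반환.
--     ordered_list: 현재 표시 순서. dragged_list: 드래그 중인 항목들(순서 유지). drop_target: 드롭 대상 항목.
--     유효하지 않으면 None 반환. (그리기 객체 등 unhashable 항목도 리스트 멤버십으로 처리.)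
--     """
--     if not dragged_list or drop_target not in ordered_list:
--         return None
--     if not all(d in ordered_list for d in dragged_list):
--         return None
--     new_order = [v for v in ordered_list if v not in dragged_list]
--     if drop_target in dragged_list:
--         target_pos = ordered_list.index(drop_target)
--         insert_idx = len(
--             [
--                 v
--                 for v in ordered_list[: target_pos + (1 if after else 0)]
--                 if v not in dragged_list
--             ]
--         )
--     else:
--         target_idx = new_order.index(drop_target)
--         insert_idx = target_idx + (1 if after else 0)
--     for v in dragged_list:
--         new_order.insert(insert_idx, v)
--         insert_idx += 1
--     return new_order
-- ===== SOURCE B (Python) =====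
-- from typing import Any, List, Optional
--
--
-- def compute_order_after_drop(
--     ordered_list: List[Any],
--     dragged_list: List[Any],
--     drop_target: Any,
--     after: bool,
-- ) -> Optional[List[Any]]:
--     # Same guards as the original; then one uniform construction: cut the
--     # original order at the drop point and concatenate kept-prefix, dragged
--     # block, kept-suffix.
--     if not dragged_list or drop_target not in ordered_list:
--         return None
--     if not all(d in ordered_list for d in dragged_list):
--         return None
--     cut = ordered_list.index(drop_target) + (1 if after else 0)
--     return (
--         [v for v in ordered_list[:cut] if v not in dragged_list]
--         + list(dragged_list)
--         + [v for v in ordered_list[cut:] if v not in dragged_list]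
--     )
-- ===== Notes on version B (the rewrite author's own statement) =====
-- stated objective: simpler
-- what changed: Replaces A's two-case insert-index computation plus a loop of list.insert calls with one uniform cut position and a three-piece concatenation (kept prefix + dragged block + kept suffix).
import Mathlib
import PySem

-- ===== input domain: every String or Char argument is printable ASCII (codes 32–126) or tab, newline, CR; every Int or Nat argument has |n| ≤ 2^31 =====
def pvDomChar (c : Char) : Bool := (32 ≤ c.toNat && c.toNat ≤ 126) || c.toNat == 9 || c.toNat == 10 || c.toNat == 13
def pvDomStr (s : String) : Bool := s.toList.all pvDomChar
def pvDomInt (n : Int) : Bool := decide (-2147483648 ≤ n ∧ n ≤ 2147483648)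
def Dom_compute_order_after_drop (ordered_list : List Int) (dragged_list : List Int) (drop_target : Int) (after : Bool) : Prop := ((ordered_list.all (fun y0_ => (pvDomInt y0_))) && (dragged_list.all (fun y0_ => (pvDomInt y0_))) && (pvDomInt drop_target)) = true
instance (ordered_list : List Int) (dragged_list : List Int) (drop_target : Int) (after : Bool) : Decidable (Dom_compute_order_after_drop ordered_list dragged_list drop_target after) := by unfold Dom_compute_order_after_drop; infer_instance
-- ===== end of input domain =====

-- B replaces the two-case insert-index computation and the insert loop with one
-- cut position and a three-piece concatenation (simpler decomposition, same values).

-- ===== PORT A =====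
def compute_order_after_drop (ordered_list : List Int) (dragged_list : List Int) (drop_target : Int) (after : Bool) : Option (List Int) :=
  if dragged_list.isEmpty || !(ordered_list.contains drop_target) then none
  else if !(dragged_list.all (fun d => ordered_list.contains d)) then none
  else
    let new_order := ordered_list.filter (fun v => !(dragged_list.contains v))
    let insert_idx : Nat :=
      if dragged_list.contains drop_target then
        let target_pos := (PySem.List.index? ordered_list drop_target).getD 0
        ((PySem.List.slice ordered_list none (some ((target_pos : Int) + (if after then 1 else 0)))).filter
          (fun v => !(dragged_list.contains v))).length
      else
        let target_idx := (PySem.List.index? new_order drop_target).getD 0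
        target_idx + (if after then 1 else 0)
    some (dragged_list.foldl
      (fun st v => (PySem.List.insert st.1 (st.2 : Int) v, st.2 + 1))
      (new_order, insert_idx)).1

-- ===== PORT B =====
def compute_order_after_drop_alt (ordered_list : List Int) (dragged_list : List Int) (drop_target : Int) (after : Bool) : Option (List Int) :=
  if dragged_list.isEmpty || !(ordered_list.contains drop_target) then none
  else if !(dragged_list.all (fun d => ordered_list.contains d)) then none
  else
    let cut := (PySem.List.index? ordered_list drop_target).getD 0 + (if after then 1 else 0)
    some ((ordered_list.take cut).filter (fun v => !(dragged_list.contains v))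
          ++ dragged_list
          ++ (ordered_list.drop cut).filter (fun v => !(dragged_list.contains v)))

-- ===== PRECONDITION & SPEC =====
def Spec_compute_order_after_drop (ordered_list : List Int) (dragged_list : List Int) (drop_target : Int) (after : Bool) (out : Option (List Int)) : Prop := out = compute_order_after_drop_alt ordered_list dragged_list drop_target after
instance (ordered_list : List Int) (dragged_list : List Int) (drop_target : Int) (after : Bool) (out : Option (List Int)) : Decidable (Spec_compute_order_after_drop ordered_list dragged_list drop_target after out) := by unfold Spec_compute_order_after_drop; infer_instance

-- ===== CLAIM (what is proved, stated in full; the proofs are below) =====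
def Claim_equal_compute_order_after_drop : Prop := ∀ (ordered_list : List Int) (dragged_list : List Int) (drop_target : Int) (after : Bool), Dom_compute_order_after_drop ordered_list dragged_list drop_target after → Spec_compute_order_after_drop ordered_list dragged_list drop_target after (compute_order_after_drop ordered_list dragged_list drop_target after)

-- ===== LEMMAS AND PROOFS =====

-- A's insert loop, starting at a valid index i, just splices dl into L at i.
theorem pv_loop_eq (dl : List Int) : ∀ (L : List Int) (i : Nat), i ≤ L.length →
    (dl.foldl (fun st v => (PySem.List.insert st.1 (st.2 : Int) v, st.2 + 1)) (L, i)).1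
      = L.take i ++ dl ++ L.drop i := by
  induction dl with
  | nil => intro L i h; simp
  | cons v dl ih =>
    intro L i h
    have hins : PySem.List.insert L (i : Int) v = L.take i ++ v :: L.drop i :=
      PySem.List.insert_natCast L i v h
    have hlen : i + 1 ≤ (L.take i ++ v :: L.drop i).length := by
      simp; omega
    have htk : (L.take i).length = i := by simp [h]
    calc (List.foldl (fun st v => (PySem.List.insert st.1 (st.2 : Int) v, st.2 + 1)) (L, i) (v :: dl)).1
        = (dl.foldl (fun st v => (PySem.List.insert st.1 (st.2 : Int) v, st.2 + 1))
            (L.take i ++ v :: L.drop i, i + 1)).1 := by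
          simp [List.foldl_cons, hins]
      _ = (L.take i ++ v :: L.drop i).take (i+1) ++ dl ++ (L.take i ++ v :: L.drop i).drop (i+1) := ih _ _ hlen
      _ = L.take i ++ v :: dl ++ L.drop i := by
          have h1 : (L.take i ++ v :: L.drop i).take (i+1) = L.take i ++ [v] := by
            have : L.take i ++ v :: L.drop i = (L.take i ++ [v]) ++ L.drop i := by simp
            rw [this]
            have hl : (L.take i ++ [v]).length = i + 1 := by simp [htk]
            rw [← hl, List.take_left]
          have h2 : (L.take i ++ v :: L.drop i).drop (i+1) = L.drop i := by
            have : L.take i ++ v :: L.drop i = (L.take i ++ [v]) ++ L.drop i := by simp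
            rw [this]
            have hl : (L.take i ++ [v]).length = i + 1 := by simp [htk]
            rw [← hl, List.drop_left]
          rw [h1, h2]; simp

-- first index of t in the filtered list = number of kept elements before t's first occurrence
theorem pv_index_filter (l : List Int) (t : Int) (p : Nat) (keep : Int → Bool)
    (hk : keep t = true) (hi : PySem.List.index? l t = some p) :
    PySem.List.index? (l.filter keep) t = some ((l.take p).filter keep).length := by
  rw [PySem.List.index?_eq_some_iff] at hi
  obtain ⟨pre, suf, hl, hlen, hnot⟩ := hi
  subst hl
  have htake : (pre ++ t :: suf).take p = pre := by
    rw [← hlen, List.take_left]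
  rw [htake]
  have hfil : (pre ++ t :: suf).filter keep = pre.filter keep ++ t :: suf.filter keep := by
    simp [List.filter_append, hk]
  rw [hfil, PySem.List.index?_eq_some_iff]
  exact ⟨pre.filter keep, suf.filter keep, rfl, rfl, fun h => hnot (List.mem_of_mem_filter h)⟩

-- ===== VERDICT (by name: the statement is the Claim_ definition above) =====
theorem compute_order_after_drop_spec : Claim_equal_compute_order_after_drop := by
  intro ol dl t after _
  unfold Spec_compute_order_after_drop compute_order_after_drop compute_order_after_drop_alt
  by_cases hguard : (dl.isEmpty || !(ol.contains t)) = true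
  · rw [if_pos hguard, if_pos hguard]
  · rw [if_neg hguard, if_neg hguard]
    by_cases hall : (!(dl.all fun d => ol.contains d)) = true
    · rw [if_pos hall, if_pos hall]
    · rw [if_neg hall, if_neg hall]
      simp only []
      have hmem' : t ∈ ol := by
        rcases Bool.or_eq_false_iff.mp (Bool.eq_false_iff.mpr hguard ▸ rfl :
          (dl.isEmpty || !(ol.contains t)) = false) with ⟨_, h2⟩
        simpa using h2
      obtain ⟨p, hp⟩ : ∃ p, PySem.List.index? ol t = some p := by
        rcases h : PySem.List.index? ol t with _ | p
        · exact absurd hmem' (by simpa using (PySem.List.index?_eq_none_iff (xs := ol) (v := t)).mp h)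
        · exact ⟨p, rfl⟩
      set keep : Int → Bool := fun v => !(dl.contains v) with hkeep
      set cut : Nat := p + (if after then 1 else 0) with hcut
      have hcutB : (PySem.List.index? ol t).getD 0 + (if after then 1 else 0) = cut := by
        rw [hp]; rfl
      have hidx :
          (if dl.contains t then
            ((PySem.List.slice ol none (some ((((PySem.List.index? ol t).getD 0 : Nat) : Int) + (if after then 1 else 0)))).filter keep).length
          else
            (PySem.List.index? (ol.filter keep) t).getD 0 + (if after then 1 else 0))
          = ((ol.take cut).filter keep).length := by
        by_cases hd : dl.contains t = true
        · simp only [hd, if_true]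
          have hcast : (((PySem.List.index? ol t).getD 0 : Nat) : Int) + (if after then (1:Int) else 0) = ((cut : Nat) : Int) := by
            rw [hp]; cases after <;> simp [hcut]
          rw [hcast, PySem.List.slice_to_natCast]
        · simp only [hd]
          have hkt : keep t = true := by simp only [hkeep]; simpa using hd
          rw [pv_index_filter ol t p keep hkt hp]
          cases after with
          | false => simp [hcut]
          | true =>
            simp only [hcut, Option.getD_some, if_true]
            rw [PySem.List.index?_eq_some_iff] at hp
            obtain ⟨pre, suf, hl, hlen, _⟩ := hp
            subst hl
            have h1 : (pre ++ t :: suf).take p = pre := by rw [← hlen, List.take_left]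
            have h2 : (pre ++ t :: suf).take (p+1) = pre ++ [t] := by
              have he : pre ++ t :: suf = (pre ++ [t]) ++ suf := by simp
              rw [he]
              have hl2 : (pre ++ [t]).length = p + 1 := by simp [hlen]
              rw [← hl2, List.take_left]
            rw [h1, h2, List.filter_append, List.filter_cons, hkt]
            simp
      rw [hidx, hcutB]
      have hsplit : ol.filter keep = (ol.take cut).filter keep ++ (ol.drop cut).filter keep := by
        rw [← List.filter_append, List.take_append_drop]
      have hle : ((ol.take cut).filter keep).length ≤ (ol.filter keep).length := by
        rw [hsplit]; simp
      rw [pv_loop_eq dl (ol.filter keep) _ hle]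
      have hlt : (ol.filter keep).take ((ol.take cut).filter keep).length = (ol.take cut).filter keep := by
        rw [hsplit, List.take_left]
      have hdr : (ol.filter keep).drop ((ol.take cut).filter keep).length = (ol.drop cut).filter keep := by
        rw [hsplit, List.drop_left]
      rw [hlt, hdr]
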